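-- pv_equiv track=rewrite | github.com/AlekseyZaychenkov/UCAH-Manager | workspace_editor/utils/event_utils.py | __get_day_numbers
-- ===== SOURCE A (Python) =====
-- def __get_day_numbers(first_day, last_day):
--     if last_day - first_day == 0:
--         return []
--     elif last_day - first_day == 1:
--         return [first_day]
--     else:
--         return [int((last_day - first_day) / 2 + first_day)] \
--             + __get_day_numbers(first_day, int((last_day - first_day) / 2 + first_day)) \
--             + __get_day_numbers(int((last_day - first_day) / 2 + first_day) + 1, last_day)
-- ===== SOURCE B (Python) =====
-- # Iterative preorder traversal with an explicit worklist stack, appending every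
-- # emitted day number to one result list, instead of recursive list concatenation.
-- def __get_day_numbers(first_day, last_day):
--     result = []
--     stack = [(first_day, last_day)]
--     while stack:
--         lo, hi = stack.pop()
--         if hi - lo <= 0:
--             continue
--         if hi - lo == 1:
--             result.append(lo)
--             continue
--         mid = int((hi - lo) / 2 + lo)
--         result.append(mid)
--         stack.append((mid + 1, hi))
--         stack.append((lo, mid))
--     return result
-- ===== Notes on version B (the rewrite author's own statement) =====
-- stated objective: faster
-- what changed: Replaced the recursive midpoint splitting with list concatenation by an iterative explicit-stack preorder traversal that appends every midpoint to a single result list; Pre_ excludes last_day < first_day, where A recurses forever (RecursionError).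
import Mathlib
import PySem

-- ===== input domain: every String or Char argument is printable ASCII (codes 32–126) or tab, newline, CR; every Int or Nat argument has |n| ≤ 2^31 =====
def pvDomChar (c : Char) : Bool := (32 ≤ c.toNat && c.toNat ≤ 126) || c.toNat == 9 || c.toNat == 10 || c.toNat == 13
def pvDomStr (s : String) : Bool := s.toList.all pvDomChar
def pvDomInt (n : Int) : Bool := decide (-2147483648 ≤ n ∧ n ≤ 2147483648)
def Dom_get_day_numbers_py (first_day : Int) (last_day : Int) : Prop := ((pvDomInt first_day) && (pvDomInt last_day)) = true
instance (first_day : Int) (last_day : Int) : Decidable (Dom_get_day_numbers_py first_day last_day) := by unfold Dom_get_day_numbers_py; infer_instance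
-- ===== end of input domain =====

-- B replaces A's recursive midpoint splitting (list concatenation, O(n log n)) by an
-- iterative explicit-stack preorder traversal appending to one list (O(n)).
-- Where Python A recurses forever (last_day < first_day) Pre_ excludes the input.


-- ===== PORT A =====
-- `int((last_day - first_day) / 2 + first_day)`: on the domain (|args| ≤ 2^31) the float
-- arithmetic is exact ((b-a)/2 + a = (a+b)/2, a half-integer below 2^52) and int()
-- truncates toward zero, so the midpoint is exactly Int.tdiv (first_day + last_day) 2.
-- The recursion is run on fuel = (last_day - first_day).toNat, a totality guard only:
-- it is proved sufficient below (goA_pad/goA_eq_fuel) whenever first_day ≤ last_day,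
-- i.e. on all of Pre_ (for last_day < first_day Python A recurses forever).
def goA (fuel : Nat) (first_day : Int) (last_day : Int) : List Int :=
  match fuel with
  | 0 => []
  | fuel + 1 =>
    if last_day - first_day = 0 then []
    else if last_day - first_day = 1 then [first_day]
    else
      let mid := Int.tdiv (first_day + last_day) 2
      [mid] ++ goA fuel first_day mid ++ goA fuel (mid + 1) last_day

def get_day_numbers_py (first_day : Int) (last_day : Int) : List Int :=
  goA (last_day - first_day).toNat first_day last_day

-- ===== PORT B =====
-- the while loop of Source B; the stack top is the list head (Python appends/pops at the end).
-- Source B's `int((hi - lo) / 2 + lo)` is, exactly as for port A, Int.tdiv (lo + hi) 2.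
-- Fuel is a totality guard: 2*(hi-lo).toNat + 1 per pending range over-counts the loop's
-- iterations (proved in loopB_invariant below).
def loopB (fuel : Nat) (stack : List (Int × Int)) (result : List Int) : List Int :=
  match fuel with
  | 0 => result
  | fuel + 1 =>
    match stack with
    | [] => result
    | (lo, hi) :: stack =>
      if hi - lo ≤ 0 then loopB fuel stack result
      else if hi - lo = 1 then loopB fuel stack (result ++ [lo])
      else
        let mid := Int.tdiv (lo + hi) 2
        loopB fuel ((lo, mid) :: (mid + 1, hi) :: stack) (result ++ [mid])

def get_day_numbers_py_alt (first_day : Int) (last_day : Int) : List Int :=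
  loopB (2 * (last_day - first_day).toNat + 1) [(first_day, last_day)] []

-- ===== PRECONDITION & SPEC =====
-- Python A raises RecursionError (it recurses forever) whenever last_day < first_day;
-- exactly those inputs are excluded.
def Pre_get_day_numbers_py (first_day : Int) (last_day : Int) : Prop := first_day ≤ last_day
instance (first_day : Int) (last_day : Int) : Decidable (Pre_get_day_numbers_py first_day last_day) := by unfold Pre_get_day_numbers_py; infer_instance
def pvWitness_get_day_numbers_py : Int × Int := (3, 11)

def Spec_get_day_numbers_py (first_day : Int) (last_day : Int) (out : List Int) : Prop := out = get_day_numbers_py_alt first_day last_day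
instance (first_day : Int) (last_day : Int) (out : List Int) : Decidable (Spec_get_day_numbers_py first_day last_day out) := by unfold Spec_get_day_numbers_py; infer_instance

-- ===== CLAIM (what is proved, stated in full; the proofs are below) =====
def Claim_equal_get_day_numbers_py : Prop := ∀ (first_day : Int) (last_day : Int), Dom_get_day_numbers_py first_day last_day → Pre_get_day_numbers_py first_day last_day → Spec_get_day_numbers_py first_day last_day (get_day_numbers_py first_day last_day)

-- ===== LEMMAS AND PROOFS =====

-- Python's int(x) on a float truncates toward zero: Int.tdiv, characterised for omega
theorem tdiv_two_trunc (a : Int) : a.tdiv 2 = if 0 ≤ a then a / 2 else -((-a) / 2) := by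
  rcases a with m | m
  · simp [Int.tdiv]
  · simp only [Int.tdiv]
    rw [if_neg (by omega)]
    simp [Int.negSucc_eq]

theorem tdiv_mid_bounds (a b : Int) (h : a + 2 ≤ b) :
    a < (a + b).tdiv 2 ∧ (a + b).tdiv 2 < b := by
  have := tdiv_two_trunc (a + b)
  split_ifs at this <;> omega

-- rfl unfolding equations for the fuel recursions
theorem goA_succ_eq (fuel : Nat) (a b : Int) :
    goA (fuel + 1) a b
      = if b - a = 0 then []
        else if b - a = 1 then [a]
        else [(a + b).tdiv 2] ++ goA fuel a ((a + b).tdiv 2)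
              ++ goA fuel ((a + b).tdiv 2 + 1) b := rfl

theorem loopB_cons_eq (fuel : Nat) (lo hi : Int) (stack : List (Int × Int)) (result : List Int) :
    loopB (fuel + 1) ((lo, hi) :: stack) result
      = if hi - lo ≤ 0 then loopB fuel stack result
        else if hi - lo = 1 then loopB fuel stack (result ++ [lo])
        else
          loopB fuel ((lo, (lo + hi).tdiv 2) :: ((lo + hi).tdiv 2 + 1, hi) :: stack)
            (result ++ [(lo + hi).tdiv 2]) := rfl

-- fuel (last_day - first_day).toNat is enough: one more unit changes nothing
theorem goA_succ (fuel : Nat) : ∀ a b : Int, a ≤ b → (b - a).toNat ≤ fuel →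
    goA (fuel + 1) a b = goA fuel a b := by
  induction fuel with
  | zero =>
    intro a b h1 h2
    have hab : b - a = 0 := by omega
    simp [goA, hab]
  | succ fuel ih =>
    intro a b h1 h2
    by_cases hd0 : b - a = 0
    · simp [goA, hd0]
    · by_cases hd1 : b - a = 1
      · simp [goA, hd1]
      · have hb : a + 2 ≤ b := by omega
        have hm := tdiv_mid_bounds a b hb
        rw [goA_succ_eq (fuel + 1) a b, if_neg hd0, if_neg hd1,
          ih a ((a + b).tdiv 2) (by omega) (by omega),
          ih ((a + b).tdiv 2 + 1) b (by omega) (by omega),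
          goA_succ_eq fuel a b, if_neg hd0, if_neg hd1]

theorem goA_pad (k : Nat) : ∀ a b : Int, a ≤ b →
    goA ((b - a).toNat + k) a b = goA (b - a).toNat a b := by
  induction k with
  | zero => intro a b _; rfl
  | succ k ih =>
    intro a b h
    rw [show (b - a).toNat + (k + 1) = ((b - a).toNat + k) + 1 by omega,
      goA_succ _ a b h (by omega), ih a b h]

theorem goA_eq_fuel (fuel : Nat) (a b : Int) (h : a ≤ b) (hf : (b - a).toNat ≤ fuel) :
    goA fuel a b = get_day_numbers_py a b := by
  rw [get_day_numbers_py, show fuel = (b - a).toNat + (fuel - (b - a).toNat) by omega,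
    goA_pad _ a b h]

theorem A_nonpos (a b : Int) (h : b - a ≤ 0) : get_day_numbers_py a b = [] := by
  rw [get_day_numbers_py, show (b - a).toNat = 0 by omega]
  rfl

theorem A_one (a b : Int) (h : b - a = 1) : get_day_numbers_py a b = [a] := by
  rw [get_day_numbers_py, show (b - a).toNat = 1 by omega]
  simp [goA, h]

-- A's defining equation in the splitting case
theorem A_split (a b : Int) (h : a + 2 ≤ b) :
    get_day_numbers_py a b
      = [(a + b).tdiv 2] ++ get_day_numbers_py a ((a + b).tdiv 2)
          ++ get_day_numbers_py ((a + b).tdiv 2 + 1) b := by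
  have hm := tdiv_mid_bounds a b h
  obtain ⟨k, hk⟩ : ∃ k : Nat, (b - a).toNat = k + 1 := ⟨(b - a).toNat - 1, by omega⟩
  rw [get_day_numbers_py, hk]
  simp only [goA, if_neg (by omega : ¬ b - a = 0), if_neg (by omega : ¬ b - a = 1)]
  rw [goA_eq_fuel k a _ (by omega) (by omega), goA_eq_fuel k _ b (by omega) (by omega)]

-- over-counting weight of the pending work: bounds the loop's remaining iterations
def stackWeight (stack : List (Int × Int)) : Nat :=
  (stack.map (fun p => 2 * (p.2 - p.1).toNat + 1)).sum

-- loop invariant: the stack is a worklist of pending subranges, emitted in preorder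
theorem loopB_invariant (fuel : Nat) : ∀ (stack : List (Int × Int)) (result : List Int),
    stackWeight stack ≤ fuel →
    loopB fuel stack result
      = result ++ (stack.map (fun p => get_day_numbers_py p.1 p.2)).flatten := by
  induction fuel with
  | zero =>
    intro stack result hw
    match stack with
    | [] => simp [loopB]
    | (lo, hi) :: stack => simp [stackWeight] at hw
  | succ fuel ih =>
    intro stack result hw
    match stack with
    | [] => simp [loopB]
    | (lo, hi) :: stack =>
      have hw' : 2 * (hi - lo).toNat + 1 + stackWeight stack ≤ fuel + 1 := by
        simpa [stackWeight] using hw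
      rw [loopB_cons_eq]
      by_cases h0 : hi - lo ≤ 0
      · have hA : get_day_numbers_py lo hi = [] := A_nonpos lo hi h0
        rw [if_pos h0, ih stack result (by omega)]
        simp [hA]
      · by_cases h1 : hi - lo = 1
        · have hA : get_day_numbers_py lo hi = [lo] := A_one lo hi h1
          rw [if_neg h0, if_pos h1, ih stack (result ++ [lo]) (by omega)]
          simp [hA]
        · have hb : lo + 2 ≤ hi := by omega
          have hm := tdiv_mid_bounds lo hi hb
          have hA := A_split lo hi hb
          rw [if_neg h0, if_neg h1]
          rw [ih ((lo, (lo + hi).tdiv 2) :: ((lo + hi).tdiv 2 + 1, hi) :: stack)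
              (result ++ [(lo + hi).tdiv 2]) (by simp only [stackWeight, List.map_cons, List.sum_cons] at *; omega)]
          simp [hA]

-- ===== VERDICT (by name: the statement is the Claim_ definition above) =====
theorem get_day_numbers_py_spec : Claim_equal_get_day_numbers_py := by
  intro a b _ _
  show get_day_numbers_py a b = get_day_numbers_py_alt a b
  rw [get_day_numbers_py_alt, loopB_invariant _ [(a, b)] [] (by simp [stackWeight])]
  simp
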